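-- pv_equiv track=rewrite | github.com/HoaangQun/300DoC | 010/CanadaSIN.py | chck_SIN
-- ===== SOURCE A (Python) =====
-- def over1(z):
--     cp = z
--
--     if z > 0:
--         cp = sum(map(int, str(z)))
--
--     return cp
--
-- def chck_SIN(a):
--     if len(str(a)) != 9: return False
--
--     a = list(map(int, str(a)))
--     s1 = s2 = 0
--     for i in range (0, len(a) - 1, 2):
--         s1 += a[i]
--
--     for i in range (1, len(a), 2):
--         s2 += over1(a[i]*2)
--
--     return (s1 + s2 + a[-1]) % 10 == 0
-- ===== SOURCE B (Python) =====
-- def chck_SIN(a):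
--     s = str(a)
--     if len(s) != 9 or not s.isdigit():
--         return False
--     total = 0
--     for i, ch in enumerate(s):
--         d = int(ch)
--         if i % 2 == 1:
--             d = d * 2
--             if d > 9:
--                 d -= 9
--         total += d
--     return total % 10 == 0
-- ===== Notes on version B (the rewrite author's own statement) =====
-- stated objective: simpler
-- what changed: B replaces A's two index-stride loops plus trailing a[-1] and the string-round-tripping over1 helper by a single enumerate pass with an inline Luhn reduction (d*2, minus 9 if over 9), and guards with s.isdigit() so non-digit strings (negative numbers) are rejected instead of raising.
-- outside the precondition, e.g. on chck_SIN(-10000000): A raises ValueError, B returns False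
import Mathlib
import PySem

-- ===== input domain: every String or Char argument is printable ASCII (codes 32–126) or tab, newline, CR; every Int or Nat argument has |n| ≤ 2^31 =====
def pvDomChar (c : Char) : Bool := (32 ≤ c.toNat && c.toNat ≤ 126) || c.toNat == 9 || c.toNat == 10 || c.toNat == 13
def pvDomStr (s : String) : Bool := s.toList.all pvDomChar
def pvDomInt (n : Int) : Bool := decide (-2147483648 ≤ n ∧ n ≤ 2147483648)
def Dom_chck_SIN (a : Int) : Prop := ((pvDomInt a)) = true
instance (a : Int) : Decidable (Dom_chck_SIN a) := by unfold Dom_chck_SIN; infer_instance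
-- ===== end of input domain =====

-- B replaces A's two index-stride loops + trailing a[-1] and the over1 string helper by one
-- enumerate pass with an inline Luhn reduction, guarded by isdigit (objective: simpler).

-- ===== PORT A =====
-- int(c) for a single character c; Python raises (ofChars? = none) on a non-digit, those
-- inputs are excluded by Pre_chck_SIN, so the .getD 0 default is never reached there.
def pvInt1 (c : Char) : Int := (PySem.Int.ofChars? [c]).getD 0

def over1 (z : Int) : Int :=
  if z > 0 then ((PySem.Int.toChars z).map pvInt1).sum else z

def chck_SIN (a : Int) : Bool :=
  if PySem.Str.len (PySem.Int.toStr a) ≠ 9 then false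
  else
    let ds := (PySem.Int.toStr a).toList.map pvInt1
    let s1 := (PySem.List.pyRange 0 (PySem.List.len ds - 1) 2).foldl
      (fun s i => s + PySem.List.pyGetD ds i 0) 0
    let s2 := (PySem.List.pyRange 1 (PySem.List.len ds) 2).foldl
      (fun s i => s + over1 (PySem.List.pyGetD ds i 0 * 2)) 0
    PySem.Int.mod (s1 + s2 + PySem.List.pyGetD ds (-1) 0) 10 == 0

-- ===== PORT B =====
def chck_SIN_alt (a : Int) : Bool :=
  let s := PySem.Int.toStr a
  if PySem.Str.len s ≠ 9 || !PySem.Str.strIsdigit s then false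
  else
    let total := (PySem.List.enumerate s.toList).foldl
      (fun tot p =>
        let d := (PySem.Int.ofChars? [p.2]).getD 0
        tot + (if PySem.Int.mod p.1 2 == 1 then
                 (if d * 2 > 9 then d * 2 - 9 else d * 2)
               else d)) 0
    PySem.Int.mod total 10 == 0

-- ===== PRECONDITION & SPEC =====
-- Pre_ excludes negative a whose decimal string is 9 characters long ('-' plus 8 digits):
-- there A raises ValueError at int('-') (B instead returns False via its isdigit guard);
-- everywhere else A returns normally.
def Pre_chck_SIN (a : Int) : Prop := ¬(a < 0 ∧ (PySem.Int.toChars a).length = 9)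
instance (a : Int) : Decidable (Pre_chck_SIN a) := by unfold Pre_chck_SIN; infer_instance
def pvWitness_chck_SIN : Int := 123456782

def Spec_chck_SIN (a : Int) (out : Bool) : Prop := out = chck_SIN_alt a
instance (a : Int) (out : Bool) : Decidable (Spec_chck_SIN a out) := by unfold Spec_chck_SIN; infer_instance

-- ===== CLAIM =====
def Claim_equal_chck_SIN : Prop := ∀ (a : Int), Dom_chck_SIN a → Pre_chck_SIN a → Spec_chck_SIN a (chck_SIN a)

-- ===== LEMMAS AND PROOFS =====

def pvDigits : List Char := ['0','1','2','3','4','5','6','7','8','9']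

theorem pv_toDigitsCore_mem (b : Nat) (hb : b = 10) :
    ∀ (f n : Nat) (l : List Char) (c : Char), c ∈ Nat.toDigitsCore b f n l → c ∈ l ∨ c ∈ pvDigits := by
  intro f
  induction f with
  | zero => intro n l c h; exact Or.inl h
  | succ f ih =>
    intro n l c h
    have hd : (n % b).digitChar ∈ pvDigits := by
      subst hb
      have : n % 10 < 10 := Nat.mod_lt _ (by norm_num)
      interval_cases (n % 10) <;> decide
    simp only [Nat.toDigitsCore] at h
    split at h
    · rcases List.mem_cons.1 h with h2 | h2
      · exact Or.inr (h2 ▸ hd)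
      · exact Or.inl h2
    · rcases ih _ _ _ h with h' | h'
      · rcases List.mem_cons.1 h' with h2 | h2
        · exact Or.inr (h2 ▸ hd)
        · exact Or.inl h2
      · exact Or.inr h'

theorem pv_toDigits_mem (n : Nat) (c : Char) (h : c ∈ Nat.toDigits 10 n) : c ∈ pvDigits := by
  rcases pv_toDigitsCore_mem 10 rfl _ _ _ _ h with h | h
  · simp at h
  · exact h

theorem pvInt1_range (c : Char) (h : c ∈ pvDigits) : 0 ≤ pvInt1 c ∧ pvInt1 c ≤ 9 := by
  fin_cases h <;> decide

theorem pv_isdigit (c : Char) (h : c ∈ pvDigits) : PySem.Chars.isdigit c = true := by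
  fin_cases h <;> decide

theorem pv_over1_luhn (d : Int) (h0 : 0 ≤ d) (h9 : d ≤ 9) :
    over1 (d * 2) = (if d * 2 > 9 then d * 2 - 9 else d * 2) := by
  interval_cases d <;> decide

theorem pv_core (c0 c1 c2 c3 c4 c5 c6 c7 c8 : Char)
    (_h0 : c0 ∈ pvDigits) (h1 : c1 ∈ pvDigits) (_h2 : c2 ∈ pvDigits) (h3 : c3 ∈ pvDigits)
    (_h4 : c4 ∈ pvDigits) (h5 : c5 ∈ pvDigits) (_h6 : c6 ∈ pvDigits) (h7 : c7 ∈ pvDigits)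
    (_h8 : c8 ∈ pvDigits) :
    (let ds := [c0,c1,c2,c3,c4,c5,c6,c7,c8].map pvInt1
     let s1 := (PySem.List.pyRange 0 (PySem.List.len ds - 1) 2).foldl
       (fun s i => s + PySem.List.pyGetD ds i 0) 0
     let s2 := (PySem.List.pyRange 1 (PySem.List.len ds) 2).foldl
       (fun s i => s + over1 (PySem.List.pyGetD ds i 0 * 2)) 0
     PySem.Int.mod (s1 + s2 + PySem.List.pyGetD ds (-1) 0) 10 == 0)
    = (let total := (PySem.List.enumerate [c0,c1,c2,c3,c4,c5,c6,c7,c8]).foldl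
         (fun tot p =>
           let d := (PySem.Int.ofChars? [p.2]).getD 0
           tot + (if PySem.Int.mod p.1 2 == 1 then
                    (if d * 2 > 9 then d * 2 - 9 else d * 2)
                  else d)) 0
       PySem.Int.mod total 10 == 0) := by
  have hr0 : PySem.List.pyRange 0 8 2 = [0,2,4,6] := by decide
  have hr1 : PySem.List.pyRange 1 9 2 = [1,3,5,7] := by decide
  simp only [List.map_cons, List.map_nil, PySem.List.len_eq, List.length_cons, List.length_nil]
  norm_num [hr0, hr1, List.foldl, PySem.List.pyGetD, PySem.List.pyGet?, PySem.List.pyIdx?,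
    PySem.List.enumerate, PySem.Int.mod, Int.fmod,
    show (2:Int).toNat = 2 from rfl, show (3:Int).toNat = 3 from rfl,
    show (4:Int).toNat = 4 from rfl, show (5:Int).toNat = 5 from rfl,
    show (6:Int).toNat = 6 from rfl, show (7:Int).toNat = 7 from rfl]
  rw [pv_over1_luhn _ (pvInt1_range c1 h1).1 (pvInt1_range c1 h1).2,
      pv_over1_luhn _ (pvInt1_range c3 h3).1 (pvInt1_range c3 h3).2,
      pv_over1_luhn _ (pvInt1_range c5 h5).1 (pvInt1_range c5 h5).2,
      pv_over1_luhn _ (pvInt1_range c7 h7).1 (pvInt1_range c7 h7).2]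
  simp only [pvInt1]
  ring_nf

-- ===== VERDICT =====
theorem chck_SIN_spec : Claim_equal_chck_SIN := by
  intro a _ hpre
  unfold Spec_chck_SIN chck_SIN chck_SIN_alt
  by_cases h9 : (PySem.Int.toChars a).length = 9
  · have ha : ¬ a < 0 := fun h => hpre ⟨h, h9⟩
    have hchars : (PySem.Int.toStr a).toList = Nat.toDigits 10 a.toNat := by
      rw [PySem.Int.toList_toStr]; simp only [PySem.Int.toChars, if_neg ha]
    have hlen9 : PySem.Str.len (PySem.Int.toStr a) = 9 := by
      rw [PySem.Str.len_eq, PySem.Int.toList_toStr, h9]; norm_num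
    have hmem : ∀ c ∈ (PySem.Int.toStr a).toList, c ∈ pvDigits := by
      rw [hchars]; exact fun c hc => pv_toDigits_mem _ c hc
    have h9' : (PySem.Int.toStr a).toList.length = 9 := by
      rw [PySem.Int.toList_toStr]; exact h9
    have hdig : PySem.Str.strIsdigit (PySem.Int.toStr a) = true := by
      rw [PySem.Str.strIsdigit_eq]
      unfold PySem.Chars.strIsdigit
      have hne : (PySem.Int.toStr a).toList.isEmpty = false := by
        rw [List.isEmpty_eq_false_iff]
        intro h; rw [h] at h9'; simp at h9'
      rw [hne]
      simp only [Bool.not_false, Bool.true_and, List.all_eq_true]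
      exact fun c hc => pv_isdigit c (hmem c hc)
    simp only [hlen9, hdig, ne_eq, not_true_eq_false, if_false, Bool.not_true, Bool.or_false]
    -- destructure the 9 characters
    rcases hcs : (PySem.Int.toStr a).toList with _ | ⟨c0, l0⟩ <;> rw [hcs] at h9' hmem
    · simp at h9'
    rcases l0 with _ | ⟨c1, l1⟩; · simp at h9'
    rcases l1 with _ | ⟨c2, l2⟩; · simp at h9'
    rcases l2 with _ | ⟨c3, l3⟩; · simp at h9'
    rcases l3 with _ | ⟨c4, l4⟩; · simp at h9'
    rcases l4 with _ | ⟨c5, l5⟩; · simp at h9'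
    rcases l5 with _ | ⟨c6, l6⟩; · simp at h9'
    rcases l6 with _ | ⟨c7, l7⟩; · simp at h9'
    rcases l7 with _ | ⟨c8, l8⟩; · simp at h9'
    have hnil : l8 = [] := by
      cases l8 with
      | nil => rfl
      | cons x t => exfalso; simp at h9'
    subst hnil
    exact pv_core c0 c1 c2 c3 c4 c5 c6 c7 c8
      (hmem _ (by simp)) (hmem _ (by simp)) (hmem _ (by simp)) (hmem _ (by simp))
      (hmem _ (by simp)) (hmem _ (by simp)) (hmem _ (by simp)) (hmem _ (by simp))
      (hmem _ (by simp))
  · have hlen : ((PySem.Int.toChars a).length : Int) ≠ 9 := by exact_mod_cast h9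
    simp [PySem.Str.len_eq, PySem.Int.toList_toStr, hlen]
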